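-- pv_equiv track=rewrite | github.com/David-5-5/tutorial | python/algo/202408/leetcode2411.py | smallestSubarrays2
-- ===== SOURCE A (Python) =====
-- from typing import List
--
-- def smallestSubarrays2(nums: List[int]) -> List[int]:
--     # 自行解答，倒序一次遍历，这次好多了，不过应该还有优化空间
--     bitlen = max(nums).bit_length() + 1 # 时间是固定 32 位的一半
--     cnt = [-1] * bitlen  # 存储幂(数组下标)的最小值，即最左端位置
--     n = len(nums)
--     # lowbit
--     ans = [1] * n
--     for i in range(n-1,-1,-1):
--         v = nums[i]
--         mn = -1 # 查找所有幂的最大值(最右端)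
--         for e in range(bitlen):
--             if v >> e & 1 == 1:
--                 cnt[e] = i
--                 if i > mn: mn = i
--             elif cnt[e] > mn:
--                 mn = cnt[e]
--         if mn != -1:  ans[i] = mn-i+1
--
--     return ans
-- ===== SOURCE B (Python) =====
-- from typing import List
--
-- def smallestSubarrays2(nums: List[int]) -> List[int]:
--     # Sliding-window variant: keep per-bit counts of the window [i, j] and shrink
--     # j while the rightmost element's bits all stay covered.
--     bitlen = max(nums).bit_length() + 1
--     n = len(nums)
--     cnt = [0] * bitlen          # how many elements of nums[i..j] have bit e set
--     ans = [1] * n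
--     j = n - 1
--     for i in range(n - 1, -1, -1):
--         v = nums[i]
--         for e in range(bitlen):
--             if (v >> e) & 1:
--                 cnt[e] += 1
--         while j > i and all(cnt[e] > 1 for e in range(bitlen) if (nums[j] >> e) & 1):
--             for e in range(bitlen):
--                 if (nums[j] >> e) & 1:
--                     cnt[e] -= 1
--             j -= 1
--         ans[i] = j - i + 1
--     return ans
-- ===== Notes on version B (the rewrite author's own statement) =====
-- stated objective: alternative
-- what changed: A keeps a per-bit table of the nearest index to the right with each bit set and takes a max over it at every position; B instead maintains a sliding window [i, j] with per-bit occurrence counts and shrinks j while every bit of nums[j] stays covered, so ans[i] = j - i + 1.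
import Mathlib
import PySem

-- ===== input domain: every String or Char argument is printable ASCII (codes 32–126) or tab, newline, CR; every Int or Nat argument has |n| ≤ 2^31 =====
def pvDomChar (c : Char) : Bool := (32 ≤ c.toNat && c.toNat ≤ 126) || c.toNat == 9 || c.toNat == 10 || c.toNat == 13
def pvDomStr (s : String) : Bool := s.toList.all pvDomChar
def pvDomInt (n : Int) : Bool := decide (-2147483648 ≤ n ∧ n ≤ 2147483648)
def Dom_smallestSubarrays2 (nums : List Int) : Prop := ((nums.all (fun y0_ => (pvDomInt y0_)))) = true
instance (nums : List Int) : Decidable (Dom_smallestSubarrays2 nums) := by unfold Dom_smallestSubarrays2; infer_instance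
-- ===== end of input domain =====

-- B replaces A's per-bit nearest-index table (max-scan per position) by a sliding window
-- [i, j] with per-bit occurrence counts, shrinking j while the right end stays redundant;
-- objective: alternative (same O(n·bitlen) cost, genuinely different bookkeeping).

-- shared helper: Python 'v >> e & 1 == 1' (>> floors, exact on negatives)
def pvBit (v : Int) (e : Nat) : Bool := PySem.Int.band (v >>> e) 1 == 1

-- ===== PORT A =====
def smallestSubarrays2 (nums : List Int) : List Int :=
  match PySem.List.max? nums (fun x => x) with
  | none => []  -- max([]) raises ValueError; excluded by Pre_
  | some mx =>
    let bitlen : Nat := PySem.Int.bitLength mx + 1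
    let cnt0 : List Int := List.replicate bitlen (-1)
    let n : Int := PySem.List.len nums
    let ans0 : List Int := List.replicate nums.length 1
    -- for i in range(n-1,-1,-1); 'cnt[e]'/'ans[i]' with indices in range: getD/set exact
    let st := (PySem.List.pyRange (n-1) (-1) (-1)).foldl (fun (st : List Int × List Int) i =>
        let v := PySem.List.pyGetD nums i 0
        let q := (List.range bitlen).foldl (fun (q : List Int × Int) e =>
            if pvBit v e then
              (q.1.set e i, if i > q.2 then i else q.2)
            else if q.1.getD e 0 > q.2 then (q.1, q.1.getD e 0)
            else q)
          (st.1, -1)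
        (q.1, if q.2 = -1 then st.2 else st.2.set i.toNat (q.2 - i + 1)))
      (cnt0, ans0)
    st.2

-- ===== PORT B =====
-- B helper: 'for e in range(bitlen): if (v>>e)&1: cnt[e] += d'  (d = 1 to add, -1 to remove)
def pvBump (v : Int) (bitlen : Nat) (d : Int) (cnt : List Int) : List Int :=
  (List.range bitlen).foldl
    (fun cnt e => if pvBit v e then cnt.set e (cnt.getD e 0 + d) else cnt) cnt

-- B helper: the while-loop shrinking j (the Python loop keeps 0 ≤ i ≤ j, so i j : Nat)
def pvShrink (nums : List Int) (bitlen : Nat) (i : Nat) (j : Nat) (cnt : List Int) :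
    Nat × List Int :=
  if h : i < j ∧ (List.range bitlen).all
      (fun e => !pvBit (nums.getD j 0) e || decide (1 < cnt.getD e 0)) then
    pvShrink nums bitlen i (j-1) (pvBump (nums.getD j 0) bitlen (-1) cnt)
  else (j, cnt)
termination_by j
decreasing_by omega

def smallestSubarrays2_alt (nums : List Int) : List Int :=
  match PySem.List.max? nums (fun x => x) with
  | none => []  -- max([]) raises ValueError; excluded by Pre_
  | some mx =>
    let bitlen : Nat := PySem.Int.bitLength mx + 1
    let n : Int := PySem.List.len nums
    let st := (PySem.List.pyRange (n-1) (-1) (-1)).foldl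
      (fun (st : List Int × List Int × Nat) i =>
        let cnt := pvBump (PySem.List.pyGetD nums i 0) bitlen 1 st.1
        let p := pvShrink nums bitlen i.toNat st.2.2 cnt
        (p.2, st.2.1.set i.toNat ((p.1 : Int) - i + 1), p.1))
      (List.replicate bitlen 0, List.replicate nums.length 1, nums.length - 1)
    st.2.1

-- ===== PRECONDITION & SPEC =====
-- Pre_ excludes only the empty list, on which Python A (and B) raise ValueError at max(nums).
def Pre_smallestSubarrays2 (nums : List Int) : Prop := nums ≠ []
instance (nums : List Int) : Decidable (Pre_smallestSubarrays2 nums) := by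
  unfold Pre_smallestSubarrays2; infer_instance
def pvWitness_smallestSubarrays2 : List Int := [1, 0, 2, 1]

def Spec_smallestSubarrays2 (nums : List Int) (out : List Int) : Prop :=
  out = smallestSubarrays2_alt nums
instance (nums : List Int) (out : List Int) : Decidable (Spec_smallestSubarrays2 nums out) := by
  unfold Spec_smallestSubarrays2; infer_instance

-- ===== CLAIM (what is proved, stated in full; the proofs are below) =====
def Claim_equal_smallestSubarrays2 : Prop := ∀ (nums : List Int), Dom_smallestSubarrays2 nums → Pre_smallestSubarrays2 nums → Spec_smallestSubarrays2 nums (smallestSubarrays2 nums)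

-- ===== LEMMAS AND PROOFS =====

-- ===== proof-only definitions =====
-- leftmost position ≥ pos (in the suffix list l) whose element has bit e set; -1 if none
def pvNearAux (e : Nat) (pos : Int) : List Int → Int
  | [] => -1
  | v :: t => if pvBit v e then pos else pvNearAux e (pos+1) t
def pvNear (nums : List Int) (e i : Nat) : Int := pvNearAux e i (nums.drop i)
-- rightmost of the leftmost occurrences of the bits < bitlen in the suffix nums[i:]
def pvMn (nums : List Int) (bitlen i : Nat) : Int :=
  (List.range bitlen).foldl (fun a e => max a (pvNear nums e i)) (-1)
def pvSpecAt (nums : List Int) (bitlen i : Nat) : Int :=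
  max (i:Int) (pvMn nums bitlen i) - i + 1
def pvAns (nums : List Int) (bitlen i : Nat) : List Int :=
  (List.range nums.length).map (fun t => if t < i then 1 else pvSpecAt nums bitlen t)
-- number of positions t ∈ [i, j] with bit e set in nums[t]
def pvOcc (nums : List Int) (e i j : Nat) : Int :=
  (((nums.drop i).take (j+1-i)).countP (fun v => pvBit v e) : Int)
-- window right end maintained by B (with the n-1 start convention at i = n)
def pvJ (nums : List Int) (bitlen i : Nat) : Nat :=
  if i = nums.length then nums.length - 1 else (max (i:Int) (pvMn nums bitlen i)).toNat
def pvStateA (nums : List Int) (bitlen i : Nat) : List Int × List Int :=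
  ((List.range bitlen).map (fun e => pvNear nums e i), pvAns nums bitlen i)
def pvStateB (nums : List Int) (bitlen i : Nat) : List Int × List Int × Nat :=
  ((List.range bitlen).map (fun e => pvOcc nums e i (pvJ nums bitlen i)),
   pvAns nums bitlen i, pvJ nums bitlen i)

lemma pv_map_range_getD (f : Nat → Int) (b k : Nat) (hk : k < b) :
    ((List.range b).map f).getD k 0 = f k := by
  rw [List.getD_eq_getElem _ _ (by simpa using hk)]
  simp

lemma pv_map_range_set (f : Nat → Int) (b k : Nat) (x : Int) (hk : k < b) :
    ((List.range b).map f).set k x = (List.range b).map (fun e => if e = k then x else f e) := by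
  apply List.ext_getElem
  · simp
  · intro n h1 h2
    simp only [List.length_set, List.length_map, List.length_range] at h1
    rw [List.getElem_set]
    simp only [List.getElem_map, List.getElem_range]
    split_ifs with h3 h4 h5 <;> first | rfl | omega

lemma pvNear_len (nums : List Int) (e : Nat) : pvNear nums e nums.length = -1 := by
  simp [pvNear, pvNearAux]

lemma pvNear_cons (nums : List Int) (e i : Nat) (hi : i < nums.length) :
    pvNear nums e i = if pvBit (nums.getD i 0) e then (i:Int) else pvNear nums e (i+1) := by
  unfold pvNear
  rw [List.drop_eq_getElem_cons hi]
  rw [List.getD_eq_getElem _ _ hi]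
  simp [pvNearAux]

lemma pvNearAux_cases (e : Nat) (l : List Int) (p : Int) :
    pvNearAux e p l = -1 ∨
      ∃ k : Nat, k < l.length ∧ pvNearAux e p l = p + k ∧ pvBit (l.getD k 0) e := by
  induction l generalizing p with
  | nil => left; rfl
  | cons v t ih =>
    by_cases hb : pvBit v e
    · right; exact ⟨0, by simp, by simp [pvNearAux, hb], by simpa using hb⟩
    · have := ih (p+1)
      rcases this with h | ⟨k, hk, he, hbk⟩
      · left; simpa [pvNearAux, hb] using h
      · right
        refine ⟨k+1, by simpa using hk, ?_, by simpa using hbk⟩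
        simp only [pvNearAux, hb, if_neg]
        rw [he]; push_cast; ring

lemma pvNear_cases (nums : List Int) (e i : Nat) :
    pvNear nums e i = -1 ∨
      ((i:Int) ≤ pvNear nums e i ∧ pvNear nums e i < nums.length ∧
        pvBit (nums.getD (pvNear nums e i).toNat 0) e) := by
  rcases pvNearAux_cases e (nums.drop i) i with h | ⟨k, hk, he, hb⟩
  · left; exact h
  · right
    rw [List.length_drop] at hk
    have hik : i + k < nums.length := by omega
    have hget : (nums.drop i).getD k 0 = nums.getD (i+k) 0 := by
      rw [List.getD_eq_getElem _ _ (by simp; omega), List.getD_eq_getElem _ _ hik]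
      simp
    unfold pvNear
    rw [he]
    refine ⟨by omega, by push_cast; omega, ?_⟩
    have : ((i:Int) + k).toNat = i + k := by omega
    rw [this, ← hget]; exact hb

lemma pv_foldl_max_init_le (l : List Int) (a : Int) : a ≤ l.foldl max a := by
  induction l generalizing a with
  | nil => simp
  | cons x t ih => exact le_trans (le_max_left a x) (ih _)

lemma pv_le_foldl_max (l : List Int) (a x : Int) (hx : x ∈ l) : x ≤ l.foldl max a := by
  induction l generalizing a with
  | nil => simp at hx
  | cons y t ih =>
    rcases List.mem_cons.mp hx with h | h
    · subst h; exact le_trans (le_max_right a x) (pv_foldl_max_init_le t _)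
    · exact ih _ h

lemma pv_foldl_max_cases (l : List Int) (a : Int) :
    l.foldl max a = a ∨ l.foldl max a ∈ l := by
  induction l generalizing a with
  | nil => left; rfl
  | cons x t ih =>
    rcases ih (max a x) with h | h
    · rcases max_choice a x with h2 | h2
      · left; simp only [List.foldl_cons]; rw [h, h2]
      · right; simp only [List.foldl_cons]; rw [h, h2]; exact List.mem_cons_self
    · right; exact List.mem_cons_of_mem _ h

lemma pv_foldl_max_le (l : List Int) (a c : Int) (ha : a ≤ c) (h : ∀ x ∈ l, x ≤ c) :
    l.foldl max a ≤ c := by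
  induction l generalizing a with
  | nil => simpa
  | cons x t ih =>
    exact ih _ (max_le ha (h x List.mem_cons_self)) (fun y hy => h y (List.mem_cons_of_mem _ hy))

lemma pvMn_eq_foldl (nums : List Int) (bitlen i : Nat) :
    pvMn nums bitlen i = ((List.range bitlen).map (fun e => pvNear nums e i)).foldl max (-1) := by
  rw [pvMn, List.foldl_map]

lemma pv_le_mn (nums : List Int) (bitlen i e : Nat) (he : e < bitlen) :
    pvNear nums e i ≤ pvMn nums bitlen i := by
  rw [pvMn_eq_foldl]
  exact pv_le_foldl_max _ _ _ (List.mem_map.mpr ⟨e, List.mem_range.mpr he, rfl⟩)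

lemma pvMn_cases (nums : List Int) (bitlen i : Nat) :
    pvMn nums bitlen i = -1 ∨ ∃ e < bitlen, pvMn nums bitlen i = pvNear nums e i := by
  rw [pvMn_eq_foldl]
  rcases pv_foldl_max_cases ((List.range bitlen).map (fun e => pvNear nums e i)) (-1) with h | h
  · left; exact h
  · right
    rcases List.mem_map.mp h with ⟨e, he, hee⟩
    exact ⟨e, List.mem_range.mp he, hee.symm⟩

lemma pvMn_lt_len (nums : List Int) (bitlen i : Nat) :
    pvMn nums bitlen i < nums.length := by
  rcases pvMn_cases nums bitlen i with h | ⟨e, he, hee⟩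
  · rw [h]; omega
  · rw [hee]
    rcases pvNear_cases nums e i with h2 | ⟨_, h2, _⟩
    · rw [h2]; omega
    · exact h2

lemma pvMn_ge (nums : List Int) (bitlen i : Nat) :
    pvMn nums bitlen i = -1 ∨ (i:Int) ≤ pvMn nums bitlen i := by
  rcases pvMn_cases nums bitlen i with h | ⟨e, he, hee⟩
  · left; exact h
  · rcases pvNear_cases nums e i with h2 | ⟨h2, _, _⟩
    · left; rw [hee, h2]
    · right; rw [hee]; exact h2

lemma pvMn_step (nums : List Int) (bitlen i : Nat) (hi : i < nums.length) :
    pvMn nums bitlen i ≤ max (i:Int) (pvMn nums bitlen (i+1)) := by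
  rw [pvMn_eq_foldl]
  apply pv_foldl_max_le
  · have : (0:Int) ≤ (i:Int) := by positivity
    omega
  · intro x hx
    rcases List.mem_map.mp hx with ⟨e, he, hee⟩
    rw [← hee, pvNear_cons nums e i hi]
    split_ifs
    · exact le_max_left _ _
    · exact le_trans (pv_le_mn nums bitlen (i+1) e (List.mem_range.mp he)) (le_max_right _ _)

lemma pvOcc_nonneg (nums : List Int) (e i j : Nat) : 0 ≤ pvOcc nums e i j := by
  unfold pvOcc; positivity

lemma pvOcc_empty (nums : List Int) (e i j : Nat) (h : j + 1 ≤ i) : pvOcc nums e i j = 0 := by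
  unfold pvOcc
  have : j + 1 - i = 0 := by omega
  rw [this]; simp

lemma pvOcc_right (nums : List Int) (e i j : Nat) (hij : i ≤ j + 1) (hj : j + 1 < nums.length) :
    pvOcc nums e i (j+1) =
      pvOcc nums e i j + (if pvBit (nums.getD (j+1) 0) e then 1 else 0) := by
  unfold pvOcc
  have h1 : j + 1 + 1 - i = (j + 1 - i) + 1 := by omega
  rw [h1, List.take_succ]
  have h2 : (nums.drop i)[j+1-i]? = some (nums.getD (j+1) 0) := by
    rw [List.getElem?_drop]
    rw [List.getD_eq_getElem _ _ hj]
    rw [List.getElem?_eq_getElem (by omega)]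
    congr 1
    congr 1
    omega
  rw [h2]
  simp only [Option.toList_some, List.countP_append, List.countP_cons, List.countP_nil]
  split_ifs with hb <;> simp [hb] <;> push_cast <;> ring

lemma pvOcc_left (nums : List Int) (e i j : Nat) (hij : i ≤ j) (hj : j < nums.length) :
    pvOcc nums e i j =
      (if pvBit (nums.getD i 0) e then 1 else 0) + pvOcc nums e (i+1) j := by
  unfold pvOcc
  have hi : i < nums.length := by omega
  rw [List.drop_eq_getElem_cons hi]
  have h1 : j + 1 - i = (j - i) + 1 := by omega
  have h2 : j + 1 - (i+1) = j - i := by omega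
  rw [h1, h2, List.take_succ_cons, List.countP_cons]
  rw [List.getD_eq_getElem _ _ hi]
  split_ifs with hb <;> simp [hb] <;> push_cast <;> ring

lemma pvOcc_pos_iff (nums : List Int) (e i j : Nat) (hj : j < nums.length) :
    1 ≤ pvOcc nums e i j ↔ (0 ≤ pvNear nums e i ∧ pvNear nums e i ≤ (j:Int)) := by
  have main : ∀ d i', j + 1 - i' = d →
      (1 ≤ pvOcc nums e i' j ↔ (0 ≤ pvNear nums e i' ∧ pvNear nums e i' ≤ (j:Int))) := by
    intro d
    induction d with
    | zero =>
      intro i' h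
      have hij : j + 1 ≤ i' := by omega
      rw [pvOcc_empty nums e i' j hij]
      constructor
      · intro h1; omega
      · rintro ⟨h1, h2⟩
        rcases pvNear_cases nums e i' with h3 | ⟨h3, _, _⟩
        · omega
        · omega
    | succ d ih =>
      intro i' h
      have hij : i' ≤ j := by omega
      rw [pvOcc_left nums e i' j hij hj, pvNear_cons nums e i' (by omega)]
      by_cases hb : pvBit (nums.getD i' 0) e
      · simp only [hb, if_true]
        have := pvOcc_nonneg nums e (i'+1) j
        constructor
        · intro _; constructor <;> [omega; exact_mod_cast Nat.cast_le.mpr hij]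
        · intro _; omega
      · simp only [hb, Bool.false_eq_true, if_false, zero_add]
        exact ih (i'+1) (by omega)
  exact main (j+1-i) i rfl

lemma pv_if_max (a b : Int) : (if b > a then b else a) = max a b := by
  split_ifs with h
  · exact (max_eq_right h.le).symm
  · exact (max_eq_left (by omega)).symm

lemma pvBump_map (v : Int) (bitlen : Nat) (d : Int) (f : Nat → Int) :
    pvBump v bitlen d ((List.range bitlen).map f) =
      (List.range bitlen).map (fun e => if pvBit v e then f e + d else f e) := by
  have key : ∀ m, m ≤ bitlen →
      (List.range m).foldl
        (fun cnt e => if pvBit v e then cnt.set e (cnt.getD e 0 + d) else cnt)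
        ((List.range bitlen).map f) =
      (List.range bitlen).map
        (fun e => if e < m then (if pvBit v e then f e + d else f e) else f e) := by
    intro m
    induction m with
    | zero => intro _; simp
    | succ m ih =>
      intro hm
      have hmb : m < bitlen := by omega
      rw [List.range_succ, List.foldl_append, ih (by omega)]
      simp only [List.foldl_cons, List.foldl_nil]
      by_cases hb : pvBit v m
      · rw [if_pos hb, pv_map_range_getD _ _ _ hmb, pv_map_range_set _ _ _ _ hmb]
        simp only [Nat.lt_irrefl, if_false]
        apply List.map_congr_left
        intro e he
        rcases Nat.lt_trichotomy e m with h | h | h <;>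
          split_ifs <;> first | rfl | omega | simp_all
      · rw [if_neg hb]
        apply List.map_congr_left
        intro e he
        rcases Nat.lt_trichotomy e m with h | h | h <;>
          split_ifs <;> first | rfl | omega | simp_all
  rw [pvBump, key bitlen (le_refl _)]
  apply List.map_congr_left
  intro e he
  simp [List.mem_range.mp he]

lemma pvShrink_spec (nums : List Int) (bitlen i : Nat) :
    ∀ j, i ≤ j → j < nums.length →
    (max (i:Int) (pvMn nums bitlen i)).toNat ≤ j →
    pvShrink nums bitlen i j ((List.range bitlen).map (fun e => pvOcc nums e i j)) =
      ((max (i:Int) (pvMn nums bitlen i)).toNat,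
       (List.range bitlen).map
         (fun e => pvOcc nums e i (max (i:Int) (pvMn nums bitlen i)).toNat)) := by
  intro j
  induction j using Nat.strong_induction_on with
  | _ j ih =>
    intro hij hj hM
    by_cases hjM : (max (i:Int) (pvMn nums bitlen i)).toNat = j
    · -- at the stopping point: the guard is false
      rw [pvShrink, dif_neg, hjM]
      rintro ⟨hlt, hall⟩
      -- j > i, so the max is pvMn and it equals j
      have hmax : max (i:Int) (pvMn nums bitlen i) = (j:Int) := by omega
      have hmn : pvMn nums bitlen i = (j:Int) := by
        rcases max_choice (i:Int) (pvMn nums bitlen i) with h | h <;> omega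
      rcases pvMn_cases nums bitlen i with h | ⟨e, he, hee⟩
      · omega
      have hne : pvNear nums e i = (j:Int) := by omega
      rcases pvNear_cases nums e i with h | ⟨_, _, hbit⟩
      · omega
      rw [hne] at hbit
      simp only [Int.toNat_natCast] at hbit
      rw [List.all_eq_true] at hall
      have h2 := hall e (List.mem_range.mpr he)
      rw [pv_map_range_getD _ _ _ he] at h2
      have hj1 : j = (j-1) + 1 := by omega
      have hocc : pvOcc nums e i j = pvOcc nums e i (j-1) + 1 := by
        rw [hj1, pvOcc_right nums e i (j-1) (by omega) (by omega)]
        rw [← hj1, hbit]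
        simp
      have hocc0 : pvOcc nums e i (j-1) = 0 := by
        have hnn := pvOcc_nonneg nums e i (j-1)
        by_contra hc
        have h3 : 1 ≤ pvOcc nums e i (j-1) := by omega
        rw [pvOcc_pos_iff nums e i (j-1) (by omega)] at h3
        omega
      rw [hbit, hocc, hocc0] at h2
      simp at h2
    · -- still above the stopping point: the guard holds, recurse
      have hMlt : (max (i:Int) (pvMn nums bitlen i)).toNat < j := by omega
      have hiM : (i:Int) ≤ max (i:Int) (pvMn nums bitlen i) := le_max_left _ _
      have hilt : i < j := by omega
      have hj1 : j = (j-1) + 1 := by omega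
      have hMmn : pvMn nums bitlen i ≤ max (i:Int) (pvMn nums bitlen i) := le_max_right _ _
      have hkey : ∀ e, e < bitlen → pvBit (nums.getD j 0) e = true →
          pvOcc nums e i j = pvOcc nums e i (j-1) + 1 ∧ 1 ≤ pvOcc nums e i (j-1) := by
        intro e he hbe
        have hocc : pvOcc nums e i j = pvOcc nums e i (j-1) + 1 := by
          rw [hj1, pvOcc_right nums e i (j-1) (by omega) (by omega), ← hj1, hbe]
          simp
        refine ⟨hocc, ?_⟩
        have h1 : 1 ≤ pvOcc nums e i j := by
          have := pvOcc_nonneg nums e i (j-1); omega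
        rw [pvOcc_pos_iff nums e i j hj] at h1
        have h2 : pvNear nums e i ≤ pvMn nums bitlen i := pv_le_mn nums bitlen i e he
        rw [pvOcc_pos_iff nums e i (j-1) (by omega)]
        constructor
        · exact h1.1
        · omega
      rw [pvShrink, dif_pos]
      · have hbump : pvBump (nums.getD j 0) bitlen (-1)
              ((List.range bitlen).map (fun e => pvOcc nums e i j)) =
            (List.range bitlen).map (fun e => pvOcc nums e i (j-1)) := by
          rw [pvBump_map]
          apply List.map_congr_left
          intro e he
          have heb := List.mem_range.mp he
          by_cases hbe : pvBit (nums.getD j 0) e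
          · rw [if_pos hbe]
            have := (hkey e heb hbe).1
            omega
          · rw [if_neg hbe]
            have : pvOcc nums e i j = pvOcc nums e i (j-1) + 0 := by
              rw [hj1, pvOcc_right nums e i (j-1) (by omega) (by omega), ← hj1]
              rw [if_neg hbe]
            omega
        rw [hbump]
        exact ih (j-1) (by omega) (by omega) (by omega) (by omega)
      · refine ⟨hilt, ?_⟩
        rw [List.all_eq_true]
        intro e hee
        have he := List.mem_range.mp hee
        by_cases hbe : pvBit (nums.getD j 0) e
        · rcases hkey e he hbe with ⟨h1, h2⟩
          rw [pv_map_range_getD _ _ _ he]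
          rw [Bool.or_eq_true]
          right
          rw [decide_eq_true_eq]
          omega
        · rw [Bool.or_eq_true]
          left
          rw [Bool.not_eq_eq_eq_not, Bool.not_true]
          exact eq_false_of_ne_true hbe

lemma pvAns_step (nums : List Int) (bitlen i : Nat) (hi : i < nums.length) :
    pvAns nums bitlen i =
      (pvAns nums bitlen (i+1)).set i (max (i:Int) (pvMn nums bitlen i) - i + 1) := by
  unfold pvAns
  rw [pv_map_range_set _ _ _ _ hi]
  apply List.map_congr_left
  intro t ht
  have htb := List.mem_range.mp ht
  rcases Nat.lt_trichotomy t i with h | h | h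
  · rw [if_pos h, if_neg (by omega), if_pos (by omega)]
  · subst h
    rw [if_neg (by omega), if_pos rfl]
    rfl
  · rw [if_neg (by omega), if_neg (by omega), if_neg (by omega)]

lemma pvStepA (nums : List Int) (bitlen i : Nat) (hi : i < nums.length) :
    ((List.range bitlen).foldl (fun (q : List Int × Int) e =>
        if pvBit (PySem.List.pyGetD nums (i:Int) 0) e then
          (q.1.set e (i:Int), if (i:Int) > q.2 then (i:Int) else q.2)
        else if q.1.getD e 0 > q.2 then (q.1, q.1.getD e 0)
        else q)
      ((pvStateA nums bitlen (i+1)).1, -1)) =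
    ((pvStateA nums bitlen i).1, pvMn nums bitlen i) := by
  simp only [PySem.List.pyGetD_natCast]
  have key : ∀ m, m ≤ bitlen →
      ((List.range m).foldl (fun (q : List Int × Int) e =>
        if pvBit (nums.getD i 0) e then
          (q.1.set e (i:Int), if (i:Int) > q.2 then (i:Int) else q.2)
        else if q.1.getD e 0 > q.2 then (q.1, q.1.getD e 0)
        else q)
      ((List.range bitlen).map (fun e => pvNear nums e (i+1)), -1)) =
      ((List.range bitlen).map
          (fun e => if e < m then pvNear nums e i else pvNear nums e (i+1)),
       (List.range m).foldl (fun a e => max a (pvNear nums e i)) (-1)) := by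
    intro m
    induction m with
    | zero =>
      intro _
      simp only [List.range_zero, List.foldl_nil]
      have : (List.range bitlen).map (fun e => pvNear nums e (i+1)) =
          (List.range bitlen).map
            (fun e => if e < 0 then pvNear nums e i else pvNear nums e (i+1)) := by
        apply List.map_congr_left
        intro e he
        rw [if_neg (by omega)]
      rw [this]
    | succ m ih =>
      intro hm
      have hmb : m < bitlen := by omega
      have hnear := pvNear_cons nums m i hi
      rw [List.range_succ, List.foldl_append, List.foldl_append, ih (by omega)]
      simp only [List.foldl_cons, List.foldl_nil]
      by_cases hb : pvBit (nums.getD i 0) m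
      · have h3 : pvNear nums m i = (i:Int) := by rw [hnear, if_pos hb]
        simp only [hb]
        rw [if_pos trivial, pv_map_range_set _ _ _ _ hmb, pv_if_max]
        congr 1
        · apply List.map_congr_left
          intro e he
          rcases Nat.lt_trichotomy e m with h | h | h
          · rw [if_neg (by omega), if_pos h, if_pos (by omega)]
          · subst h
            rw [if_pos rfl, if_pos (by omega), h3]
          · rw [if_neg (by omega), if_neg (by omega), if_neg (by omega)]
        · rw [h3]
      · have h3 : pvNear nums m i = pvNear nums m (i+1) := by rw [hnear, if_neg hb]
        simp only [hb]
        rw [if_neg (by simp), pv_map_range_getD _ _ _ hmb]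
        have hg : (if m < m then pvNear nums m i else pvNear nums m (i+1)) =
            pvNear nums m (i+1) := if_neg (lt_irrefl m)
        rw [hg]
        have hni := h3
        have hmap : (List.range bitlen).map
              (fun e => if e < m then pvNear nums e i else pvNear nums e (i+1)) =
            (List.range bitlen).map
              (fun e => if e < m + 1 then pvNear nums e i else pvNear nums e (i+1)) := by
          apply List.map_congr_left
          intro e he
          rcases Nat.lt_trichotomy e m with h | h | h
          · rw [if_pos h, if_pos (by omega)]
          · subst h
            rw [if_neg (lt_irrefl e), if_pos (by omega), hni]
          · rw [if_neg (by omega), if_neg (by omega)]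
        split_ifs with h2
        · rw [hmap]
          congr 1
          rw [h3]
          exact (max_eq_right (le_of_lt h2)).symm
        · rw [hmap]
          congr 1
          rw [h3]
          exact (max_eq_left (le_of_not_gt h2)).symm
  have hfin := key bitlen (le_refl _)
  simp only [pvStateA]
  rw [hfin]
  congr 1
  apply List.map_congr_left
  intro e he
  rw [if_pos (List.mem_range.mp he)]

lemma pvJ_facts (nums : List Int) (bitlen i : Nat) (hi : i < nums.length) :
    i ≤ pvJ nums bitlen (i+1) ∧ pvJ nums bitlen (i+1) < nums.length ∧
      (max (i:Int) (pvMn nums bitlen i)).toNat ≤ pvJ nums bitlen (i+1) := by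
  have h1 := pvMn_lt_len nums bitlen (i+1)
  have h2 := pvMn_lt_len nums bitlen i
  have h3 := pvMn_step nums bitlen i hi
  unfold pvJ
  split_ifs with h
  · -- i+1 = length, window starts at j = length-1 = i
    simp only [max_def] at h3 ⊢
    split_ifs at h3 ⊢ <;> omega
  · have h4 : i + 1 < nums.length := by omega
    simp only [max_def] at h3 ⊢
    split_ifs at h3 ⊢ <;> omega

lemma pvJ_eq (nums : List Int) (bitlen i : Nat) (hi : i < nums.length) :
    pvJ nums bitlen i = (max (i:Int) (pvMn nums bitlen i)).toNat := by
  unfold pvJ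
  rw [if_neg (by omega)]

lemma pvAnsA (nums : List Int) (bitlen i : Nat) (hi : i < nums.length) :
    (if pvMn nums bitlen i = -1 then pvAns nums bitlen (i+1)
     else (pvAns nums bitlen (i+1)).set i (pvMn nums bitlen i - i + 1)) =
    pvAns nums bitlen i := by
  split_ifs with h
  · unfold pvAns
    apply List.map_congr_left
    intro t ht
    rcases Nat.lt_trichotomy t i with h2 | h2 | h2
    · rw [if_pos h2, if_pos (by omega)]
    · subst h2
      rw [if_pos (by omega), if_neg (by omega)]
      unfold pvSpecAt
      rw [h]
      have : max (t:Int) (-1) = (t:Int) := max_eq_left (by omega)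
      rw [this]; ring
    · rw [if_neg (by omega), if_neg (by omega)]
  · rcases pvMn_ge nums bitlen i with h2 | h2
    · exact absurd h2 h
    · rw [pvAns_step nums bitlen i hi]
      congr 1
      rw [max_eq_right h2]

lemma pvAnsA' (nums : List Int) (bitlen i : Nat) (hi : i < nums.length) :
    (((pvStateA nums bitlen i).1,
      if pvMn nums bitlen i = -1 then (pvStateA nums bitlen (i+1)).2
      else (pvStateA nums bitlen (i+1)).2.set i (pvMn nums bitlen i - i + 1)) :
        List Int × List Int) =
    pvStateA nums bitlen i := by
  simp only [pvStateA]
  rw [pvAnsA nums bitlen i hi]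

lemma pvStepB (nums : List Int) (bitlen i : Nat) (hi : i < nums.length) :
    (let st := pvStateB nums bitlen (i+1)
     let cnt := pvBump (PySem.List.pyGetD nums (i:Int) 0) bitlen 1 st.1
     let p := pvShrink nums bitlen ((i:Int)).toNat st.2.2 cnt
     ((p.2, st.2.1.set ((i:Int)).toNat ((p.1 : Int) - (i:Int) + 1), p.1) :
        List Int × List Int × Nat)) =
    pvStateB nums bitlen i := by
  obtain ⟨hA, hB, hC⟩ := pvJ_facts nums bitlen i hi
  simp only [pvStateB, PySem.List.pyGetD_natCast, Int.toNat_natCast]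
  rw [pvBump_map]
  have hbump : (List.range bitlen).map
        (fun e => if pvBit (nums.getD i 0) e then pvOcc nums e (i+1) (pvJ nums bitlen (i+1)) + 1
                  else pvOcc nums e (i+1) (pvJ nums bitlen (i+1))) =
      (List.range bitlen).map (fun e => pvOcc nums e i (pvJ nums bitlen (i+1))) := by
    apply List.map_congr_left
    intro e he
    have hocc := pvOcc_left nums e i (pvJ nums bitlen (i+1)) hA hB
    split_ifs with hb
    · rw [hocc, if_pos hb]; ring
    · rw [hocc, if_neg hb]; ring
  rw [hbump]
  rw [pvShrink_spec nums bitlen i (pvJ nums bitlen (i+1)) (by omega) hB hC]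
  have hnn : (0:Int) ≤ max (i:Int) (pvMn nums bitlen i) :=
    le_trans (by omega) (le_max_left _ _)
  have hcast : (((max (i:Int) (pvMn nums bitlen i)).toNat : Int)) =
      max (i:Int) (pvMn nums bitlen i) := Int.toNat_of_nonneg hnn
  rw [pvJ_eq nums bitlen i hi]
  congr 1
  congr 1
  rw [hcast, ← pvAns_step nums bitlen i hi]

lemma pvInitA (nums : List Int) (bitlen : Nat) :
    pvStateA nums bitlen nums.length =
      (List.replicate bitlen (-1), List.replicate nums.length 1) := by
  unfold pvStateA
  congr 1
  · have : (List.range bitlen).map (fun e => pvNear nums e nums.length) =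
        (List.range bitlen).map (fun _ => (-1 : Int)) := by
      apply List.map_congr_left
      intro e _
      exact pvNear_len nums e
    rw [this, List.map_const', List.length_range]
  · unfold pvAns
    have : (List.range nums.length).map
          (fun t => if t < nums.length then (1:Int) else pvSpecAt nums bitlen t) =
        (List.range nums.length).map (fun _ => (1 : Int)) := by
      apply List.map_congr_left
      intro t ht
      rw [if_pos (List.mem_range.mp ht)]
    rw [this, List.map_const', List.length_range]

lemma pvInitB (nums : List Int) (bitlen : Nat) :
    pvStateB nums bitlen nums.length =
      (List.replicate bitlen 0, List.replicate nums.length 1, nums.length - 1) := by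
  unfold pvStateB
  have hJ : pvJ nums bitlen nums.length = nums.length - 1 := by
    unfold pvJ; rw [if_pos rfl]
  rw [hJ]
  congr 1
  · have : (List.range bitlen).map
          (fun e => pvOcc nums e nums.length (nums.length - 1)) =
        (List.range bitlen).map (fun _ => (0 : Int)) := by
      apply List.map_congr_left
      intro e _
      by_cases hn : nums.length = 0
      · rw [List.eq_nil_of_length_eq_zero hn]
        unfold pvOcc
        simp
      · exact pvOcc_empty nums e nums.length (nums.length - 1) (by omega)
    rw [this, List.map_const', List.length_range]
  · congr 1
    unfold pvAns
    have : (List.range nums.length).map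
          (fun t => if t < nums.length then (1:Int) else pvSpecAt nums bitlen t) =
        (List.range nums.length).map (fun _ => (1 : Int)) := by
      apply List.map_congr_left
      intro t ht
      rw [if_pos (List.mem_range.mp ht)]
    rw [this, List.map_const', List.length_range]

lemma pvStepB' (nums : List Int) (bitlen m : Nat) (hm : m < nums.length) :
    ((pvShrink nums bitlen ((m:Int)).toNat (pvStateB nums bitlen (m+1)).2.2
        (pvBump (PySem.List.pyGetD nums (m:Int) 0) bitlen 1 (pvStateB nums bitlen (m+1)).1)).2,
     (pvStateB nums bitlen (m+1)).2.1.set ((m:Int)).toNat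
        (((pvShrink nums bitlen ((m:Int)).toNat (pvStateB nums bitlen (m+1)).2.2
            (pvBump (PySem.List.pyGetD nums (m:Int) 0) bitlen 1 (pvStateB nums bitlen (m+1)).1)).1 : Int)
          - (m:Int) + 1),
     (pvShrink nums bitlen ((m:Int)).toNat (pvStateB nums bitlen (m+1)).2.2
        (pvBump (PySem.List.pyGetD nums (m:Int) 0) bitlen 1 (pvStateB nums bitlen (m+1)).1)).1) =
    pvStateB nums bitlen m := by
  exact pvStepB nums bitlen m hm

lemma pvFoldA (nums : List Int) (bitlen : Nat) (m : Nat) (hm : m ≤ nums.length) :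
    (PySem.List.pyRange ((m:Int)-1) (-1) (-1)).foldl (fun (st : List Int × List Int) i =>
        let v := PySem.List.pyGetD nums i 0
        let q := (List.range bitlen).foldl (fun (q : List Int × Int) e =>
            if pvBit v e then
              (q.1.set e i, if i > q.2 then i else q.2)
            else if q.1.getD e 0 > q.2 then (q.1, q.1.getD e 0)
            else q)
          (st.1, -1)
        (q.1, if q.2 = -1 then st.2 else st.2.set i.toNat (q.2 - i + 1)))
      (pvStateA nums bitlen m) = pvStateA nums bitlen 0 := by
  induction m with
  | zero =>
    rw [PySem.List.pyRange_neg_one_eq_nil (by omega)]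
    rfl
  | succ m ih =>
    rw [show ((m+1:Nat):Int) - 1 = (m:Int) by push_cast; ring]
    rw [PySem.List.pyRange_neg_one_cons (by push_cast; omega)]
    simp only [List.foldl_cons]
    rw [pvStepA nums bitlen m (by omega)]
    simp only [Int.toNat_natCast]
    rw [pvAnsA' nums bitlen m (by omega)]
    exact ih (by omega)

lemma pvFoldB (nums : List Int) (bitlen : Nat) (m : Nat) (hm : m ≤ nums.length) :
    (PySem.List.pyRange ((m:Int)-1) (-1) (-1)).foldl
      (fun (st : List Int × List Int × Nat) i =>
        let cnt := pvBump (PySem.List.pyGetD nums i 0) bitlen 1 st.1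
        let p := pvShrink nums bitlen i.toNat st.2.2 cnt
        (p.2, st.2.1.set i.toNat ((p.1 : Int) - i + 1), p.1))
      (pvStateB nums bitlen m) = pvStateB nums bitlen 0 := by
  induction m with
  | zero =>
    rw [PySem.List.pyRange_neg_one_eq_nil (by omega)]
    rfl
  | succ m ih =>
    rw [show ((m+1:Nat):Int) - 1 = (m:Int) by push_cast; ring]
    rw [PySem.List.pyRange_neg_one_cons (by push_cast; omega)]
    simp only [List.foldl_cons]
    rw [pvStepB' nums bitlen m (by omega)]
    exact ih (by omega)

-- ===== VERDICT (by name: the statement is the Claim_ definition above) =====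
theorem smallestSubarrays2_spec : Claim_equal_smallestSubarrays2 := by
  intro nums _ _
  unfold Spec_smallestSubarrays2
  unfold smallestSubarrays2 smallestSubarrays2_alt
  cases hmax : PySem.List.max? nums (fun x => x) with
  | none => rfl
  | some mx =>
    simp only [PySem.List.len_eq]
    rw [← pvInitA nums (PySem.Int.bitLength mx + 1), ← pvInitB nums (PySem.Int.bitLength mx + 1)]
    rw [pvFoldA nums (PySem.Int.bitLength mx + 1) nums.length (le_refl _),
        pvFoldB nums (PySem.Int.bitLength mx + 1) nums.length (le_refl _)]
    rfl
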